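-- pv_equiv track=rewrite | github.com/xkdciizdkeji/innovus_design_space_exploration | random_constraint_modifier.py | rectangles_to_points
-- ===== SOURCE A (Python) =====
-- def rectangles_to_points(rectangles):
--     """
--     将矩形列表转换为多边形点序列（阶梯状多边形）
--
--     参数:
--         rectangles (list): 矩形列表，每个矩形由 [[左下x, 左下y], [右上x, 右上y]] 表示
--
--     返回:
--         list: 多边形点序列，按逆时针顺序排列
--     """
--     if not rectangles:
--         return []
--
--     # 按底部y坐标排序矩形（从下到上）
--     sorted_rects = sorted(rectangles, key=lambda r: r[0][1])
--
--     # 提取每层矩形的左右端点和y坐标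
--     layer_endpoints = []
--     for rect in sorted_rects:
--         left_x, bottom_y = rect[0]
--         right_x, top_y = rect[1]
--
--         # 添加底部端点
--         layer_endpoints.append((left_x, right_x, bottom_y))
--         # 添加顶部端点
--         layer_endpoints.append((left_x, right_x, top_y))
--
--     # 按y坐标从小到大排序
--     sorted_endpoints = sorted(layer_endpoints, key=lambda e: e[2])
--
--     # 合并相同高度的端点
--     merged_endpoints = []
--     current_y = None
--     current_left = float('inf')
--     current_right = float('-inf')
--
--     for left_x, right_x, y in sorted_endpoints:
--         if y != current_y:
--             # 保存前一层（如果存在）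
--             if current_y is not None:
--                 merged_endpoints.append((current_left, current_right, current_y))
--             # 开始新的一层
--             current_y = y
--             current_left = left_x
--             current_right = right_x
--         else:
--             # 更新当前层的左右端点
--             current_left = min(current_left, left_x)
--             current_right = max(current_right, right_x)
--
--     # 添加最后一层
--     if current_y is not None:
--         merged_endpoints.append((current_left, current_right, current_y))
--
--     # 分别构建左侧轮廓和右侧轮廓
--     left_profile = []
--     right_profile = []
--
--     # 处理每一层的端点
--     for i, (left_x, right_x, y) in enumerate(merged_endpoints):
--         # 处理左侧轮廓
--         if i > 0:
--             prev_left_x = merged_endpoints[i-1][0]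
--             # 如果左侧x坐标变化，添加一个垂直连接点
--             if abs(left_x - prev_left_x) > 1e-6:
--                 left_profile.append((prev_left_x, y))
--
--         # 添加当前左侧点
--         left_profile.append((left_x, y))
--
--         # 处理右侧轮廓
--         if i > 0:
--             prev_right_x = merged_endpoints[i-1][1]
--             # 如果右侧x坐标变化，添加一个垂直连接点
--             if abs(right_x - prev_right_x) > 1e-6:
--                 right_profile.append((prev_right_x, y))
--
--         # 添加当前右侧点
--         right_profile.append((right_x, y))
--
--     # 合并左右轮廓：左侧轮廓从下到上，右侧轮廓从上到下
--     boundary = left_profile + list(reversed(right_profile))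
--
--     # # 确保多边形闭合
--     # if boundary and (boundary[0][0] != boundary[-1][0] or boundary[0][1] != boundary[-1][1]):
--     #     boundary.append(boundary[0])
--
--     return boundary
-- ===== SOURCE B (Python) =====
-- def rectangles_to_points(rectangles):
--     if not rectangles:
--         return []
--
--     # One pass: collect the (left, right, y) endpoint tuples of every rectangle.
--     spans = []
--     for rect in rectangles:
--         left_x, bottom_y = rect[0]
--         right_x, top_y = rect[1]
--         spans.append((left_x, right_x, bottom_y))
--         spans.append((left_x, right_x, top_y))
--
--     # For each distinct height (ascending), the merged horizontal extent.
--     merged = [(min(l for l, _, yy in spans if yy == y),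
--                max(r for _, r, yy in spans if yy == y),
--                y)
--               for y in sorted({y for _, _, y in spans})]
--
--     # Left profile bottom-up, right profile top-down, with vertical connectors.
--     left_profile, right_profile = [], []
--     prev = None
--     for l, r, y in merged:
--         if prev is not None:
--             pl, pr = prev
--             if abs(l - pl) > 1e-6:
--                 left_profile.append((pl, y))
--             if abs(r - pr) > 1e-6:
--                 right_profile.append((pr, y))
--         left_profile.append((l, y))
--         right_profile.append((r, y))
--         prev = (l, r)
--     return left_profile + right_profile[::-1]
-- ===== Notes on version B (the rewrite author's own statement) =====
-- stated objective: simpler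
-- what changed: Drops A's unused rectangle sort and its sort-then-stateful-merge of endpoint tuples: B collects endpoints in one pass, takes sorted(set(ys)) and computes each layer's min-left/max-right by direct scans, and builds the two profiles with a prev variable instead of enumerate plus index lookups.
import Mathlib
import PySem

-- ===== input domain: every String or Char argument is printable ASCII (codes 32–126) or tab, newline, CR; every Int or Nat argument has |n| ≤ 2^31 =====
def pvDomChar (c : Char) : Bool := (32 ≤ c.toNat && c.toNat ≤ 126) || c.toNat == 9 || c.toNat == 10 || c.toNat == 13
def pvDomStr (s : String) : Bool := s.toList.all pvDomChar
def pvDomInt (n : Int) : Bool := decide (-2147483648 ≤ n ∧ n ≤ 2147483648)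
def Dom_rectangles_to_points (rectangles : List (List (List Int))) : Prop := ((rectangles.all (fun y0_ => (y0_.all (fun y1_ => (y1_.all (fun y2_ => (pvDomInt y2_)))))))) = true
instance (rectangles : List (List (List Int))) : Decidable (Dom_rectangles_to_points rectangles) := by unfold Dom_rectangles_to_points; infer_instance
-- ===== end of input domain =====

-- B drops A's unused rectangle sort and its sort-then-merge of endpoint tuples: it takes the
-- sorted set of heights and computes each layer's extent by direct min/max scans, building the
-- profiles with a carried previous value; return values proved equal on Pre_ (well-shaped rects).


-- ===== PORT A =====
-- shared with port B: both Pythons extract the same two (left, right, y) tuples from a rectangle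
-- (left_x, bottom_y = rect[0]; right_x, top_y = rect[1])
def pvRectEndpoints (rect : List (List Int)) : List (Int × Int × Int) :=
  let p0 := PySem.List.pyGetD rect 0 []
  let p1 := PySem.List.pyGetD rect 1 []
  let left_x := PySem.List.pyGetD p0 0 0
  let bottom_y := PySem.List.pyGetD p0 1 0
  let right_x := PySem.List.pyGetD p1 0 0
  let top_y := PySem.List.pyGetD p1 1 0
  [(left_x, right_x, bottom_y), (left_x, right_x, top_y)]

-- the merge loop's step: state = (merged so far, current layer as Option (left, right, y));
-- current_y = None in Python is `none` here (the inf/-inf seeds are dead until current_y is set)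
def pvMergeStep (st : List (Int × Int × Int) × Option (Int × Int × Int))
    (e : Int × Int × Int) : List (Int × Int × Int) × Option (Int × Int × Int) :=
  match st.2 with
  | none => (st.1, some e)
  | some c =>
    if e.2.2 ≠ c.2.2 then (st.1 ++ [c], some e)
    else (st.1, some (min c.1 e.1, max c.2.1 e.2.1, c.2.2))

-- the profile loop's step (i, e) over enumerate(merged_endpoints); `abs(x - x') > 1e-6` on
-- integer coordinates is exactly `x ≠ x'`
def pvProfStep (merged : List (Int × Int × Int)) (pr : List (Int × Int) × List (Int × Int))
    (ie : Int × Int × Int × Int) : List (Int × Int) × List (Int × Int) :=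
  let i := ie.1
  let e := ie.2
  let lp := if i > 0 then
      (let prev_left_x := (PySem.List.pyGetD merged (i - 1) (0, 0, 0)).1
       if e.1 ≠ prev_left_x then pr.1 ++ [(prev_left_x, e.2.2)] else pr.1)
    else pr.1
  let rp := if i > 0 then
      (let prev_right_x := (PySem.List.pyGetD merged (i - 1) (0, 0, 0)).2.1
       if e.2.1 ≠ prev_right_x then pr.2 ++ [(prev_right_x, e.2.2)] else pr.2)
    else pr.2
  (lp ++ [(e.1, e.2.2)], rp ++ [(e.2.1, e.2.2)])

def rectangles_to_points (rectangles : List (List (List Int))) : List (Int × Int) :=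
  if rectangles = [] then []
  else
    let sorted_rects := PySem.List.sorted rectangles
      (fun r => PySem.List.pyGetD (PySem.List.pyGetD r 0 []) 1 0) false
    let layer_endpoints := sorted_rects.foldl (fun acc rect => acc ++ pvRectEndpoints rect) []
    let sorted_endpoints := PySem.List.sorted layer_endpoints (fun e => e.2.2) false
    let st := sorted_endpoints.foldl pvMergeStep ([], none)
    let merged_endpoints := match st.2 with
      | none => st.1
      | some c => st.1 ++ [c]
    let profs := (PySem.List.enumerate merged_endpoints).foldl (pvProfStep merged_endpoints) ([], [])
    profs.1 ++ profs.2.reverse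

-- ===== PORT B =====
-- profile loop with a carried prev = (prev_left, prev_right); again `abs > 1e-6` on ints is ≠
def pvProfStepB (st : List (Int × Int) × List (Int × Int) × Option (Int × Int))
    (e : Int × Int × Int) : List (Int × Int) × List (Int × Int) × Option (Int × Int) :=
  match st.2.2 with
  | none => (st.1 ++ [(e.1, e.2.2)], st.2.1 ++ [(e.2.1, e.2.2)], some (e.1, e.2.1))
  | some p =>
    ((if e.1 ≠ p.1 then st.1 ++ [(p.1, e.2.2)] else st.1) ++ [(e.1, e.2.2)],
     (if e.2.1 ≠ p.2 then st.2.1 ++ [(p.2, e.2.2)] else st.2.1) ++ [(e.2.1, e.2.2)],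
     some (e.1, e.2.1))

def rectangles_to_points_alt (rectangles : List (List (List Int))) : List (Int × Int) :=
  if rectangles = [] then []
  else
    let spans := rectangles.foldl (fun acc rect => acc ++ pvRectEndpoints rect) []
    let ys := PySem.List.sorted (PySem.Set.ofList (spans.map (fun e => e.2.2))) (fun y => y) false
    let merged := ys.map (fun y =>
      ((PySem.List.min? ((spans.filter (fun e => e.2.2 == y)).map (fun e => e.1))
          (fun x => x)).getD 0,
       (PySem.List.max? ((spans.filter (fun e => e.2.2 == y)).map (fun e => e.2.1))
          (fun x => x)).getD 0,
       y))
    let pr := merged.foldl pvProfStepB ([], [], none)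
    pr.1 ++ pr.2.1.reverse

-- ===== PRECONDITION & SPEC =====
-- Pre_ excludes exactly the inputs where Python A raises: a rectangle with fewer than two
-- points (IndexError) or whose first/second point does not have exactly two coordinates
-- (unpacking ValueError).
def Pre_rectangles_to_points (rectangles : List (List (List Int))) : Prop :=
  ∀ r ∈ rectangles, 2 ≤ r.length ∧ (r.getD 0 []).length = 2 ∧ (r.getD 1 []).length = 2
instance (rectangles : List (List (List Int))) : Decidable (Pre_rectangles_to_points rectangles) := by
  unfold Pre_rectangles_to_points; infer_instance

def pvWitness_rectangles_to_points : List (List (List Int)) :=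
  [[[0, 0], [4, 2]], [[1, 2], [3, 5]]]

def Spec_rectangles_to_points (rectangles : List (List (List Int))) (out : List (Int × Int)) : Prop := out = rectangles_to_points_alt rectangles
instance (rectangles : List (List (List Int))) (out : List (Int × Int)) : Decidable (Spec_rectangles_to_points rectangles out) := by unfold Spec_rectangles_to_points; infer_instance

-- ===== CLAIM (what is proved, stated in full; the proofs are below) =====
def Claim_equal_rectangles_to_points : Prop := ∀ (rectangles : List (List (List Int))), Dom_rectangles_to_points rectangles → Pre_rectangles_to_points rectangles → Spec_rectangles_to_points rectangles (rectangles_to_points rectangles)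

-- ===== LEMMAS AND PROOFS =====

-- recursive forms of the two profile loops: left/right profile given the previous left/right x
def pvLProf (pl : Int) : List (Int × Int × Int) → List (Int × Int)
  | [] => []
  | e :: t => (if e.1 ≠ pl then [(pl, e.2.2)] else []) ++ (e.1, e.2.2) :: pvLProf e.1 t

def pvRProf (pr : Int) : List (Int × Int × Int) → List (Int × Int)
  | [] => []
  | e :: t => (if e.2.1 ≠ pr then [(pr, e.2.2)] else []) ++ (e.2.1, e.2.2) :: pvRProf e.2.1 t

def pvLast (p : Int × Int) : List (Int × Int × Int) → Int × Int
  | [] => p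
  | e :: t => pvLast (e.1, e.2.1) t

-- recursive form of A's merge loop (current layer (cl, cr, cy), remaining endpoints)
def pvMrg : Int → Int → Int → List (Int × Int × Int) → List (Int × Int × Int)
  | cl, cr, cy, [] => [(cl, cr, cy)]
  | cl, cr, cy, e :: t =>
    if e.2.2 ≠ cy then (cl, cr, cy) :: pvMrg e.1 e.2.1 e.2.2 t
    else pvMrg (min cl e.1) (max cr e.2.1) cy t

def pvFinish (st : List (Int × Int × Int) × Option (Int × Int × Int)) : List (Int × Int × Int) :=
  match st.2 with
  | none => st.1
  | some c => st.1 ++ [c]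

-- B's per-layer extent and B's merged list, as named functions of an endpoint list
def pvMinL (L : List (Int × Int × Int)) (y : Int) : Int :=
  (PySem.List.min? ((L.filter (fun e => e.2.2 == y)).map (fun e => e.1)) (fun x => x)).getD 0

def pvMaxR (L : List (Int × Int × Int)) (y : Int) : Int :=
  (PySem.List.max? ((L.filter (fun e => e.2.2 == y)).map (fun e => e.2.1)) (fun x => x)).getD 0

def pvCanon (L : List (Int × Int × Int)) : List (Int × Int × Int) :=
  (PySem.List.dedup (L.map (fun e => e.2.2))).map (fun y => (pvMinL L y, pvMaxR L y, y))

-- ---- B's profile fold ----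
lemma pvB_fold (m : List (Int × Int × Int)) : ∀ (la ra : List (Int × Int)) (pl pr : Int),
    m.foldl pvProfStepB (la, ra, some (pl, pr))
      = (la ++ pvLProf pl m, ra ++ pvRProf pr m, some (pvLast (pl, pr) m)) := by
  induction m with
  | nil => intro la ra pl pr; simp [pvLProf, pvRProf, pvLast]
  | cons e t ih =>
    intro la ra pl pr
    simp only [List.foldl_cons, pvProfStepB]
    rw [ih]
    simp only [pvLProf, pvRProf, pvLast]
    split_ifs <;> simp

lemma pvB_profile (e : Int × Int × Int) (t : List (Int × Int × Int)) :
    (e :: t).foldl pvProfStepB ([], [], none)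
      = ((e.1, e.2.2) :: pvLProf e.1 t, (e.2.1, e.2.2) :: pvRProf e.2.1 t,
         some (pvLast (e.1, e.2.1) t)) := by
  simp only [List.foldl_cons, pvProfStepB]
  rw [pvB_fold]
  simp

-- ---- A's merge fold ----
lemma pvMerge_fold : ∀ (t : List (Int × Int × Int)) (acc : List (Int × Int × Int)) (cl cr cy : Int),
    pvFinish (t.foldl pvMergeStep (acc, some (cl, cr, cy))) = acc ++ pvMrg cl cr cy t := by
  intro t
  induction t with
  | nil => intro acc cl cr cy; simp [pvFinish, pvMrg]
  | cons e t ih =>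
    intro acc cl cr cy
    simp only [List.foldl_cons, pvMergeStep]
    by_cases h : e.2.2 = cy
    · rw [if_neg (by simp [h])]
      rw [ih]
      simp [pvMrg, h]
    · rw [if_pos h]
      rw [ih]
      simp [pvMrg, h]

-- ---- A's profile fold ----
lemma pvA_fold_suffix (m : List (Int × Int × Int)) :
    ∀ (n k : Nat), m.length - k = n → ∀ (hk : k < m.length) (la ra : List (Int × Int)),
    (PySem.List.enumerate (m.drop (k + 1)) ((k : Int) + 1)).foldl (pvProfStep m) (la, ra)
      = (la ++ pvLProf (m[k].1) (m.drop (k + 1)), ra ++ pvRProf (m[k].2.1) (m.drop (k + 1))) := by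
  intro n
  induction n with
  | zero => intro k hn hk; omega
  | succ n ih =>
    intro k hn hk la ra
    by_cases h : k + 1 < m.length
    · rw [List.drop_eq_getElem_cons h, PySem.List.enumerate_cons, List.foldl_cons]
      have hstep : pvProfStep m (la, ra) ((k : Int) + 1, m[k + 1])
          = (la ++ ((if m[k + 1].1 ≠ m[k].1 then [(m[k].1, m[k + 1].2.2)] else [])
                ++ [(m[k + 1].1, m[k + 1].2.2)]),
             ra ++ ((if m[k + 1].2.1 ≠ m[k].2.1 then [(m[k].2.1, m[k + 1].2.2)] else [])
                ++ [(m[k + 1].2.1, m[k + 1].2.2)])) := by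
        have hget : PySem.List.pyGetD m ((k : Int) + 1 - 1) (0, 0, 0) = m[k] := by
          rw [show ((k : Int) + 1 - 1) = (k : Int) by ring, PySem.List.pyGetD_natCast,
            List.getD_eq_getElem _ _ hk]
        have hpos : ((k : Int) + 1 > 0) := by omega
        simp only [pvProfStep, hget, if_pos hpos]
        split_ifs <;> simp
      rw [hstep]
      have hstart : ((k : Int) + 1) + 1 = ((k + 1 : Nat) : Int) + 1 := by push_cast; ring
      rw [hstart, ih (k + 1) (by omega) h]
      have hdl : pvLProf (m[k].1) (m[k + 1] :: m.drop (k + 1 + 1))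
          = (if m[k + 1].1 ≠ m[k].1 then [(m[k].1, m[k + 1].2.2)] else [])
            ++ (m[k + 1].1, m[k + 1].2.2) :: pvLProf (m[k + 1].1) (m.drop (k + 1 + 1)) := by
        simp [pvLProf]
      have hdr : pvRProf (m[k].2.1) (m[k + 1] :: m.drop (k + 1 + 1))
          = (if m[k + 1].2.1 ≠ m[k].2.1 then [(m[k].2.1, m[k + 1].2.2)] else [])
            ++ (m[k + 1].2.1, m[k + 1].2.2) :: pvRProf (m[k + 1].2.1) (m.drop (k + 1 + 1)) := by
        simp [pvRProf]
      rw [hdl, hdr]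
      simp
    · have hd : m.drop (k + 1) = [] := List.drop_eq_nil_of_le (by omega)
      rw [hd]
      simp [PySem.List.enumerate, pvLProf, pvRProf]

lemma pvA_profile_eq_B (m : List (Int × Int × Int)) :
    (PySem.List.enumerate m).foldl (pvProfStep m) ([], [])
      = ((m.foldl pvProfStepB ([], [], none)).1, (m.foldl pvProfStepB ([], [], none)).2.1) := by
  cases m with
  | nil => simp [PySem.List.enumerate]
  | cons e t =>
    rw [pvB_profile]
    show (PySem.List.enumerate (e :: t) 0).foldl (pvProfStep (e :: t)) ([], []) = _
    rw [PySem.List.enumerate_cons, List.foldl_cons]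
    have hstep : pvProfStep (e :: t) ([], []) ((0 : Int), e)
        = ([(e.1, e.2.2)], [(e.2.1, e.2.2)]) := by
      simp [pvProfStep]
    rw [hstep]
    have h0 : t = (e :: t).drop (0 + 1) := rfl
    have hs : ((0 : Int) + 1) = ((0 : Nat) : Int) + 1 := by norm_num
    rw [show PySem.List.enumerate t ((0 : Int) + 1)
          = PySem.List.enumerate ((e :: t).drop (0 + 1)) (((0 : Nat) : Int) + 1) by rw [← h0, hs]]
    rw [pvA_fold_suffix (e :: t) (t.length + 1 - 0) 0 rfl (by simp)]
    simp

-- ---- dedup facts (via PySem.Set.ofList = foldl Set.add) ----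
lemma pvFoldl_add_cons (xs : List Int) : ∀ (s : List Int) (y : Int), y ∉ xs →
    List.foldl PySem.Set.add (y :: s) xs = y :: List.foldl PySem.Set.add s xs := by
  induction xs with
  | nil => intro s y _; rfl
  | cons x xs ih =>
    intro s y hy
    have hxney : ¬ (x = y) := by
      simp only [List.mem_cons, not_or] at hy
      exact Ne.symm hy.1
    simp only [List.foldl_cons]
    have hadd : PySem.Set.add (y :: s) x
        = y :: PySem.Set.add s x := by
      simp only [PySem.Set.add, PySem.Set.contains]
      by_cases hx : x ∈ s <;> simp [hx, hxney]
    rw [hadd, ih _ y (by simp only [List.mem_cons, not_or] at hy; exact hy.2)]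

lemma pvDedup_cons_of_not_mem (x : Int) (xs : List Int) (h : x ∉ xs) :
    PySem.List.dedup (x :: xs) = x :: PySem.List.dedup xs := by
  rw [PySem.List.dedup_eq_ofList, PySem.List.dedup_eq_ofList, PySem.Set.ofList_eq_foldl,
    PySem.Set.ofList_eq_foldl]
  show List.foldl PySem.Set.add (PySem.Set.add [] x) xs = _
  have : PySem.Set.add ([] : List Int) x = [x] := rfl
  rw [this]
  exact pvFoldl_add_cons xs [] x h

lemma pvDedup_cons_dup (x : Int) (xs : List Int) :
    PySem.List.dedup (x :: x :: xs) = PySem.List.dedup (x :: xs) := by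
  rw [PySem.List.dedup_eq_ofList, PySem.List.dedup_eq_ofList, PySem.Set.ofList_eq_foldl,
    PySem.Set.ofList_eq_foldl]
  show List.foldl PySem.Set.add (PySem.Set.add (PySem.Set.add [] x) x) xs
      = List.foldl PySem.Set.add (PySem.Set.add [] x) xs
  have h1 : PySem.Set.add ([] : List Int) x = [x] := rfl
  have h2 : PySem.Set.add [x] x = [x] := by simp [PySem.Set.add, PySem.Set.contains]
  rw [h1, h2]

lemma pvFoldl_add_sublist (xs : List Int) : ∀ (s : List Int),
    ∃ t, List.foldl PySem.Set.add s xs = s ++ t ∧ List.Sublist t xs := by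
  induction xs with
  | nil => intro s; exact ⟨[], by simp⟩
  | cons x xs ih =>
    intro s
    simp only [List.foldl_cons]
    by_cases h : x ∈ s
    · have : PySem.Set.add s x = s := by simp [PySem.Set.add, PySem.Set.contains, h]
      rw [this]
      obtain ⟨t, ht, hsub⟩ := ih s
      exact ⟨t, ht, hsub.cons x⟩
    · have : PySem.Set.add s x = s ++ [x] := by simp [PySem.Set.add, PySem.Set.contains, h]
      rw [this]
      obtain ⟨t, ht, hsub⟩ := ih (s ++ [x])
      exact ⟨x :: t, by simpa using ht, hsub.cons₂ x⟩

lemma pvDedup_sublist (xs : List Int) : List.Sublist (PySem.List.dedup xs) xs := by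
  rw [PySem.List.dedup_eq_ofList, PySem.Set.ofList_eq_foldl]
  obtain ⟨t, ht, hsub⟩ := pvFoldl_add_sublist xs []
  simpa [ht] using hsub

lemma pvDedup_pairwise_lt (xs : List Int) (h : xs.Pairwise (· ≤ ·)) :
    (PySem.List.dedup xs).Pairwise (· < ·) := by
  have hle : (PySem.List.dedup xs).Pairwise (· ≤ ·) := h.sublist (pvDedup_sublist xs)
  have hne : (PySem.List.dedup xs).Pairwise (· ≠ ·) := PySem.List.nodup_dedup xs
  exact (hle.and hne).imp (fun hab => lt_of_le_of_ne hab.1 hab.2)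

-- ---- min?/max? only depend on the multiset ----
lemma pvMin?_id_perm {l1 l2 : List Int} (h : l1.Perm l2) :
    PySem.List.min? l1 (fun x => x) = PySem.List.min? l2 (fun x => x) := by
  cases h1 : PySem.List.min? l1 (fun x => x) with
  | none =>
    have h1' : l1 = [] := (PySem.List.min?_eq_none_iff _ _).mp h1
    subst h1'
    rw [eq_comm, PySem.List.min?_eq_none_iff]
    exact h.symm.eq_nil
  | some m =>
    cases h2 : PySem.List.min? l2 (fun x => x) with
    | none =>
      have h2' : l2 = [] := (PySem.List.min?_eq_none_iff _ _).mp h2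
      subst h2'
      have h1' : l1 = [] := h.eq_nil
      subst h1'
      rw [(PySem.List.min?_eq_none_iff _ _).mpr rfl] at h1
      cases h1
    | some m2 =>
      have hm1 := PySem.List.min?_mem h1
      have hm2 := PySem.List.min?_mem h2
      exact congrArg some (le_antisymm (PySem.List.min?_isMin h1 m2 (h.symm.subset hm2))
        (PySem.List.min?_isMin h2 m (h.subset hm1)))

lemma pvMax?_id_perm {l1 l2 : List Int} (h : l1.Perm l2) :
    PySem.List.max? l1 (fun x => x) = PySem.List.max? l2 (fun x => x) := by
  cases h1 : PySem.List.max? l1 (fun x => x) with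
  | none =>
    have h1' : l1 = [] := (PySem.List.max?_eq_none_iff _ _).mp h1
    subst h1'
    rw [eq_comm, PySem.List.max?_eq_none_iff]
    exact h.symm.eq_nil
  | some m =>
    cases h2 : PySem.List.max? l2 (fun x => x) with
    | none =>
      have h2' : l2 = [] := (PySem.List.max?_eq_none_iff _ _).mp h2
      subst h2'
      have h1' : l1 = [] := h.eq_nil
      subst h1'
      rw [(PySem.List.max?_eq_none_iff _ _).mpr rfl] at h1
      cases h1
    | some m2 =>
      have hm1 := PySem.List.max?_mem h1
      have hm2 := PySem.List.max?_mem h2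
      exact congrArg some (le_antisymm (PySem.List.max?_isMax h2 m (h.subset hm1))
        (PySem.List.max?_isMax h1 m2 (h.symm.subset hm2)))

lemma pvMinL_perm {L1 L2 : List (Int × Int × Int)} (h : L1.Perm L2) (y : Int) :
    pvMinL L1 y = pvMinL L2 y := by
  unfold pvMinL
  rw [pvMin?_id_perm ((h.filter _).map _)]

lemma pvMaxR_perm {L1 L2 : List (Int × Int × Int)} (h : L1.Perm L2) (y : Int) :
    pvMaxR L1 y = pvMaxR L2 y := by
  unfold pvMaxR
  rw [pvMax?_id_perm ((h.filter _).map _)]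

-- ---- the merge of a y-sorted endpoint list is the per-distinct-y min/max table ----
lemma pvMrg_canon : ∀ (t : List (Int × Int × Int)) (cl cr cy : Int),
    ((cl, cr, cy) :: t).Pairwise (fun a b => a.2.2 ≤ b.2.2) →
    pvMrg cl cr cy t = pvCanon ((cl, cr, cy) :: t) := by
  intro t
  induction t with
  | nil =>
    intro cl cr cy _
    unfold pvCanon pvMinL pvMaxR
    rw [show ([(cl, cr, cy)].map (fun e => e.2.2)) = [cy] from rfl,
      pvDedup_cons_of_not_mem cy [] (by simp)]
    simp [pvMrg, PySem.List.dedup, PySem.List.min?_id_cons, PySem.List.max?_id_cons]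
  | cons e t ih =>
    intro cl cr cy hs
    by_cases hy : e.2.2 = cy
    · have hs' : ((min cl e.1, max cr e.2.1, cy) :: t).Pairwise (fun a b => a.2.2 ≤ b.2.2) := by
        rw [List.pairwise_cons] at hs ⊢
        refine ⟨fun b hb => ?_, (hs.2.sublist (List.sublist_cons_self e t))⟩
        have := (List.pairwise_cons.mp hs.2).1 b hb
        simpa [hy] using this
      rw [pvMrg, if_neg (by simp [hy]), ih _ _ _ hs']
      -- pvCanon of the merged two-head list equals pvCanon of the original list
      unfold pvCanon
      have hd : PySem.List.dedup (((cl, cr, cy) :: e :: t).map (fun e => e.2.2))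
          = PySem.List.dedup (((min cl e.1, max cr e.2.1, cy) :: t).map (fun e => e.2.2)) := by
        simp only [List.map_cons, hy]
        exact pvDedup_cons_dup cy (t.map (fun e => e.2.2))
      rw [← hd]
      refine List.map_congr_left (fun z _ => ?_)
      have hminz : pvMinL ((min cl e.1, max cr e.2.1, cy) :: t) z
          = pvMinL ((cl, cr, cy) :: e :: t) z := by
        unfold pvMinL
        by_cases hz : cy = z
        · simp only [List.filter_cons, hy, hz, BEq.rfl, if_pos, List.map_cons]
          rw [PySem.List.min?_id_cons, PySem.List.min?_id_cons]
          simp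
        · simp only [List.filter_cons, hy, show (cy == z) = false by simp [hz]]
          simp
      have hmaxz : pvMaxR ((min cl e.1, max cr e.2.1, cy) :: t) z
          = pvMaxR ((cl, cr, cy) :: e :: t) z := by
        unfold pvMaxR
        by_cases hz : cy = z
        · simp only [List.filter_cons, hy, hz, BEq.rfl, if_pos, List.map_cons]
          rw [PySem.List.max?_id_cons, PySem.List.max?_id_cons]
          simp
        · simp only [List.filter_cons, hy, show (cy == z) = false by simp [hz]]
          simp
      rw [hminz, hmaxz]
    · -- new strictly-higher layer
      have hcy : ∀ b ∈ e :: t, cy < b.2.2 := by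
        intro b hb
        rcases List.mem_cons.mp hb with hb | hb
        · subst hb
          exact lt_of_le_of_ne ((List.pairwise_cons.mp hs).1 b (by simp)) (Ne.symm hy)
        · have h1 : e.2.2 ≤ b.2.2 := (List.pairwise_cons.mp (List.pairwise_cons.mp hs).2).1 b hb
          exact lt_of_lt_of_le (lt_of_le_of_ne ((List.pairwise_cons.mp hs).1 e (by simp))
            (Ne.symm hy)) h1
      rw [pvMrg, if_pos (by simpa using hy), ih e.1 e.2.1 e.2.2 (by
        have := (List.pairwise_cons.mp hs).2
        simpa using this)]
      unfold pvCanon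
      have hnm : cy ∉ (e :: t).map (fun e => e.2.2) := by
        intro hmem
        obtain ⟨b, hb, hbe⟩ := List.mem_map.mp hmem
        exact absurd hbe (ne_of_gt (hcy b hb))
      have hmapcons : ((cl, cr, cy) :: e :: t).map (fun e => e.2.2)
          = cy :: ((e :: t).map (fun e => e.2.2)) := by simp
      rw [hmapcons, pvDedup_cons_of_not_mem cy _ hnm, List.map_cons]
      congr 1
      · beta_reduce
        unfold pvMinL pvMaxR
        have hfilter : (e :: t).filter (fun b => b.2.2 == cy) = [] := by
          rw [List.filter_eq_nil_iff]
          intro b hb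
          simp [ne_of_gt (hcy b hb)]
        have hfl : ((cl, cr, cy) :: e :: t).filter (fun b => b.2.2 == cy)
            = [(cl, cr, cy)] := by
          have hstep : ((cl, cr, cy) :: e :: t).filter (fun b => b.2.2 == cy)
              = (cl, cr, cy) :: (e :: t).filter (fun b => b.2.2 == cy) := by
            simp [List.filter_cons]
          rw [hstep, hfilter]
        rw [hfl]
        simp [PySem.List.min?_id_cons, PySem.List.max?_id_cons]
      · refine List.map_congr_left (fun z hz => ?_)
        have hzmem : z ∈ (e :: t).map (fun e => e.2.2) :=
          (PySem.List.mem_dedup _ z).mp hz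
        have hzc : cy ≠ z := by
          obtain ⟨b, hb, hbe⟩ := List.mem_map.mp hzmem
          exact hbe ▸ ne_of_lt (hcy b hb)
        unfold pvMinL pvMaxR
        have hflz : ((cl, cr, cy) :: e :: t).filter (fun b => b.2.2 == z)
            = (e :: t).filter (fun b => b.2.2 == z) := by
          simp [List.filter_cons, hzc]
        rw [hflz]

-- ---- pvCanon of the sorted endpoint list is B's merged table ----
lemma pvCanon_eq_B (S E : List (Int × Int × Int)) (hperm : S.Perm E)
    (hsorted : (S.map (fun e => e.2.2)).Pairwise (· ≤ ·)) :
    pvCanon S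
      = (PySem.List.sorted (PySem.Set.ofList (E.map (fun e => e.2.2))) (fun y => y) false).map
          (fun y => (pvMinL E y, pvMaxR E y, y)) := by
  have hidx : PySem.List.sorted (PySem.Set.ofList (E.map (fun e => e.2.2))) (fun y => y) false
      = PySem.List.dedup (S.map (fun e => e.2.2)) := by
    apply PySem.List.sorted_eq_of_perm_of_pairwise_lt
    · rw [List.perm_ext_iff_of_nodup (PySem.List.nodup_dedup _) (PySem.Set.nodup_ofList _)]
      intro z
      rw [PySem.List.mem_dedup, PySem.Set.mem_ofList, (hperm.map (fun e => e.2.2)).mem_iff]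
    · exact pvDedup_pairwise_lt _ hsorted
  rw [hidx]
  unfold pvCanon
  exact List.map_congr_left (fun z _ => by rw [pvMinL_perm hperm, pvMaxR_perm hperm])



def pvBoundaryA (m : List (Int × Int × Int)) : List (Int × Int) :=
  let profs := (PySem.List.enumerate m).foldl (pvProfStep m) ([], [])
  profs.1 ++ profs.2.reverse

def pvBoundaryB (m : List (Int × Int × Int)) : List (Int × Int) :=
  let pr := m.foldl pvProfStepB ([], [], none)
  pr.1 ++ pr.2.1.reverse

lemma pvBoundary_eq (m : List (Int × Int × Int)) : pvBoundaryA m = pvBoundaryB m := by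
  unfold pvBoundaryA pvBoundaryB
  rw [pvA_profile_eq_B]

-- ===== VERDICT (by name: the statement is the Claim_ definition above) =====
theorem rectangles_to_points_spec : Claim_equal_rectangles_to_points := by
  intro rects _hdom _hpre
  unfold Spec_rectangles_to_points
  by_cases hne : rects = []
  · simp [rectangles_to_points, rectangles_to_points_alt, hne]
  · have hA : rectangles_to_points rects
        = pvBoundaryA (pvFinish ((PySem.List.sorted
            ((PySem.List.sorted rects
                (fun r => PySem.List.pyGetD (PySem.List.pyGetD r 0 []) 1 0) false).flatMap
              pvRectEndpoints)
            (fun e => e.2.2) false).foldl pvMergeStep ([], none))) := by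
      simp only [rectangles_to_points, if_neg hne, PySem.List.foldl_append_eq_flatMap,
        List.nil_append]
      rfl
    have hB : rectangles_to_points_alt rects
        = pvBoundaryB ((PySem.List.sorted
            (PySem.Set.ofList ((rects.flatMap pvRectEndpoints).map (fun e => e.2.2)))
            (fun y => y) false).map
          (fun y => (pvMinL (rects.flatMap pvRectEndpoints) y,
                     pvMaxR (rects.flatMap pvRectEndpoints) y, y))) := by
      simp only [rectangles_to_points_alt, if_neg hne, PySem.List.foldl_append_eq_flatMap,
        List.nil_append]
      rfl
    set E := rects.flatMap pvRectEndpoints with hEdef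
    set SR := PySem.List.sorted rects
      (fun r => PySem.List.pyGetD (PySem.List.pyGetD r 0 []) 1 0) false with hSRdef
    set S := PySem.List.sorted (SR.flatMap pvRectEndpoints) (fun e => e.2.2) false with hSdef
    have hperm : S.Perm E :=
      (PySem.List.sorted_perm _ _ _).trans
        (List.Perm.flatMap_right pvRectEndpoints (PySem.List.sorted_perm _ _ _))
    have hSne : S ≠ [] := by
      intro h
      rw [hSdef, PySem.List.sorted_eq_nil_iff, List.flatMap_eq_nil_iff] at h
      obtain ⟨r, hr⟩ := List.exists_mem_of_ne_nil SR
        (by rw [hSRdef, Ne, PySem.List.sorted_eq_nil_iff]; exact hne)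
      have := h r hr
      simp [pvRectEndpoints] at this
    have hsorted : S.Pairwise (fun a b => a.2.2 ≤ b.2.2) := by
      rw [hSdef]
      exact PySem.List.sorted_pairwise _ _
    have hsortmap : (S.map (fun e => e.2.2)).Pairwise (· ≤ ·) := by
      rw [hSdef]
      exact PySem.List.sorted_map_key_pairwise _ _
    obtain ⟨e, t, hS⟩ := List.exists_cons_of_ne_nil hSne
    have hmerged : pvFinish (S.foldl pvMergeStep ([], none)) = pvCanon S := by
      obtain ⟨cl, cr, cy⟩ := e
      rw [hS]
      have h1 : ((cl, cr, cy) :: t).foldl pvMergeStep ([], none)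
          = t.foldl pvMergeStep ([], some (cl, cr, cy)) := rfl
      rw [h1, pvMerge_fold t [] cl cr cy, List.nil_append]
      exact pvMrg_canon t cl cr cy (hS ▸ hsorted)
    have hcanon : pvCanon S
        = (PySem.List.sorted (PySem.Set.ofList (E.map (fun e => e.2.2))) (fun y => y) false).map
            (fun y => (pvMinL E y, pvMaxR E y, y)) :=
      pvCanon_eq_B S E hperm hsortmap
    rw [hA, hB, hmerged, hcanon, pvBoundary_eq]
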